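-- pv_equiv track=rewrite | github.com/ericcgu/Algorithms_Python | src/recursion/x_doctors_engineers_recur.py | findProfession
-- ===== SOURCE A (Python) =====
-- def findProfession(level, pos):
--     if level == 1:
--         return 'Engineer'
--     if findProfession(level-1, (pos+1)//2) == 'Engineer':
--         if pos % 2 == 0:
--             return 'Engineer'
--         else:
--             return 'Doctor'
--     else:
--         if pos % 2 == 0:
--             return 'Doctor'
--         else:
--             return 'Engineer'
-- ===== SOURCE B (Python) =====
-- def findProfession(level, pos):
--     flips = 0
--     while level > 1 and pos != 0 and pos != 1:
--         if pos % 2 != 0: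
--             flips = 1 - flips
--         pos = (pos + 1) // 2
--         level -= 1
--     if pos == 1 and (level - 1) % 2 != 0:
--         flips = 1 - flips
--     return 'Doctor' if flips else 'Engineer'
-- ===== Notes on version B (the rewrite author's own statement) =====
-- stated objective: faster
-- what changed: A recurses level-1 times unconditionally; B runs a loop that halves pos until it hits the fixed points 0/1 (at most ~log2|pos| iterations), tracking a flip bit, and closes all remaining levels at once with a parity formula on level-1.
import Mathlib
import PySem

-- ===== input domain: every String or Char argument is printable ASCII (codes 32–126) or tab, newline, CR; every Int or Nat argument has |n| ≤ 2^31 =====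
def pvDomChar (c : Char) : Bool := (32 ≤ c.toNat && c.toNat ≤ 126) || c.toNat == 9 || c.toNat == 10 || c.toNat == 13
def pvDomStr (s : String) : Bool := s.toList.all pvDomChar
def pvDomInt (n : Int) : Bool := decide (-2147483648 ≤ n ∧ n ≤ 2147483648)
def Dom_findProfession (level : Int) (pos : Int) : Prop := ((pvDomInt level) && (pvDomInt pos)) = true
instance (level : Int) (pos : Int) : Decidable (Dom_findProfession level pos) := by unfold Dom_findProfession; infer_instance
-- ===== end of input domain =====

-- B replaces A's O(level) recursion by a loop that halves pos (O(log|pos|) iterations)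
-- and closes the remaining levels with a parity formula; objective: faster (asymptotic).


-- ===== PORT A =====
-- A recurses on level; the Nat fuel is exactly level-1, the number of recursive calls
-- Python makes when level ≥ 1 (Pre_ admits only those inputs; for level ≤ 0 Python never returns).
def findProfessionGo : Nat → Int → String
  | 0, _ => "Engineer"
  | n+1, pos =>
    if findProfessionGo n (PySem.Int.floordiv (pos + 1) 2) = "Engineer" then
      if PySem.Int.mod pos 2 = 0 then "Engineer" else "Doctor"
    else
      if PySem.Int.mod pos 2 = 0 then "Doctor" else "Engineer"

def findProfession (level : Int) (pos : Int) : String :=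
  findProfessionGo (level - 1).toNat pos

-- ===== PORT B =====
-- the while loop of Source B; state (flips, level, pos); stops when level ≤ 1 or pos ∈ {0, 1}
def altLoop (flips : Int) (level : Int) (pos : Int) : Int × Int × Int :=
  if level > 1 ∧ pos ≠ 0 ∧ pos ≠ 1 then
    altLoop (if PySem.Int.mod pos 2 ≠ 0 then 1 - flips else flips)
      (level - 1) (PySem.Int.floordiv (pos + 1) 2)
  else (flips, level, pos)
termination_by level.toNat
decreasing_by omega

def findProfession_alt (level : Int) (pos : Int) : String :=
  let s := altLoop 0 level pos
  let flips := if s.2.2 = 1 ∧ PySem.Int.mod (s.2.1 - 1) 2 ≠ 0 then 1 - s.1 else s.1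
  if flips ≠ 0 then "Doctor" else "Engineer"

-- ===== PRECONDITION & SPEC =====
-- Pre_ excludes level ≤ 0, where Python A recurses forever / raises RecursionError.
def Pre_findProfession (level : Int) (pos : Int) : Prop := 1 ≤ level
instance (level : Int) (pos : Int) : Decidable (Pre_findProfession level pos) := by
  unfold Pre_findProfession; infer_instance

def pvWitness_findProfession : Int × Int := (3, 5)

def Spec_findProfession (level : Int) (pos : Int) (out : String) : Prop := out = findProfession_alt level pos
instance (level : Int) (pos : Int) (out : String) : Decidable (Spec_findProfession level pos out) := by unfold Spec_findProfession; infer_instance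

-- ===== CLAIM (what is proved, stated in full; the proofs are below) =====
def Claim_equal_findProfession : Prop := ∀ (level : Int) (pos : Int), Dom_findProfession level pos → Pre_findProfession level pos → Spec_findProfession level pos (findProfession level pos)

-- ===== LEMMAS AND PROOFS =====

-- parity of flips that A accumulates along its recursion (true = "Doctor")
def par : Nat → Int → Bool
  | 0, _ => false
  | n+1, pos => xor (par n (PySem.Int.floordiv (pos + 1) 2)) (PySem.Int.mod pos 2 ≠ 0)

lemma mod_two_cases (pos : Int) : PySem.Int.mod pos 2 = 0 ∨ PySem.Int.mod pos 2 = 1 := by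
  have h1 := PySem.Int.mod_nonneg pos (b := 2) (by norm_num)
  have h2 := PySem.Int.mod_lt pos (b := 2) (by norm_num)
  omega

lemma A_char (n : Nat) : ∀ pos : Int, findProfessionGo n pos = if par n pos then "Doctor" else "Engineer" := by
  induction n with
  | zero => intro pos; simp [findProfessionGo, par]
  | succ n ih =>
    intro pos
    simp only [findProfessionGo, par]
    rw [ih]
    rcases mod_two_cases pos with hm | hm <;>
      rcases Bool.eq_false_or_eq_true (par n (PySem.Int.floordiv (pos + 1) 2)) with hpar | hpar <;>
        simp only [hpar, hm] <;> simp

lemma par_zero (n : Nat) : par n 0 = false := by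
  induction n with
  | zero => rfl
  | succ n ih =>
    have h1 : PySem.Int.floordiv (0 + 1) 2 = 0 := by decide
    rw [par, h1, ih]
    decide

lemma par_one (n : Nat) : par n 1 = decide (n % 2 = 1) := by
  induction n with
  | zero => rfl
  | succ n ih =>
    have h1 : PySem.Int.floordiv (1 + 1) 2 = 1 := by decide
    rw [par, h1, ih]
    rcases Nat.mod_two_eq_zero_or_one n with h | h <;>
      · have h' : (n + 1) % 2 = 1 - n % 2 := by omega
        simp [h, h']

-- B's finishing step on the loop's final state
def finishB (s : Int × Int × Int) : Int :=
  if s.2.2 = 1 ∧ PySem.Int.mod (s.2.1 - 1) 2 ≠ 0 then 1 - s.1 else s.1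

lemma alt_eq (level pos : Int) :
    findProfession_alt level pos =
      if finishB (altLoop 0 level pos) ≠ 0 then "Doctor" else "Engineer" := rfl

lemma finishB_zero (flips l : Int) : finishB (flips, l, 0) = flips := by
  simp [finishB]

lemma finishB_one (flips l : Int) (hf : flips = 0 ∨ flips = 1) :
    finishB (flips, l, 1) =
      if xor (flips ≠ 0) (PySem.Int.mod (l - 1) 2 = 1) then 1 else 0 := by
  show (if (1 : Int) = 1 ∧ PySem.Int.mod (l - 1) 2 ≠ 0 then 1 - flips else flips) = _
  rcases mod_two_cases (l - 1) with h | h <;> rw [h] <;> rcases hf with hfv | hfv <;>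
    simp [hfv]

lemma loop_inv (m : Nat) : ∀ (level pos flips : Int), level = (m : Int) + 1 →
    (flips = 0 ∨ flips = 1) →
    finishB (altLoop flips level pos) = if xor (flips ≠ 0) (par m pos) then 1 else 0 := by
  induction m with
  | zero =>
    intro level pos flips hl hf
    subst hl
    have hg : ¬(((0 : Nat) : Int) + 1 > 1 ∧ pos ≠ 0 ∧ pos ≠ 1) := by
      rintro ⟨h, -⟩; omega
    rw [altLoop, if_neg hg]
    have hm : PySem.Int.mod (((0 : Nat) : Int) + 1 - 1) 2 = 0 := by norm_num [PySem.Int.mod]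
    simp only [finishB, par, hm]
    rcases hf with h | h <;> simp [h]
  | succ m ih =>
    intro level pos flips hl hf
    subst hl
    by_cases hpos : pos ≠ 0 ∧ pos ≠ 1
    · have hg : (((m + 1 : Nat) : Int) + 1 > 1 ∧ pos ≠ 0 ∧ pos ≠ 1) :=
        ⟨by push_cast; omega, hpos⟩
      rw [altLoop, if_pos hg]
      have hl' : ((m + 1 : Nat) : Int) + 1 - 1 = (m : Int) + 1 := by push_cast; ring
      rw [hl']
      have hf' : (if PySem.Int.mod pos 2 ≠ 0 then 1 - flips else flips) = 0 ∨
          (if PySem.Int.mod pos 2 ≠ 0 then 1 - flips else flips) = 1 := by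
        rcases hf with h | h <;> split_ifs <;> simp [h]
      rw [ih _ _ _ rfl hf']
      simp only [par]
      rcases mod_two_cases pos with hm | hm <;>
        rcases hf with h | h <;>
          rcases Bool.eq_false_or_eq_true (par m (PySem.Int.floordiv (pos + 1) 2)) with hp | hp <;>
            simp only [hm, hp, h] <;> simp
    · have hpos' : pos = 0 ∨ pos = 1 := by
        rcases not_and_or.mp hpos with h | h
        · exact Or.inl (not_not.mp h)
        · exact Or.inr (not_not.mp h)
      have hg : ¬(((m + 1 : Nat) : Int) + 1 > 1 ∧ pos ≠ 0 ∧ pos ≠ 1) := fun h => hpos h.2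
      rw [altLoop, if_neg hg]
      rcases hpos' with h0 | h1
      · subst h0
        rw [finishB_zero, par_zero]
        rcases hf with h | h <;> simp [h]
      · subst h1
        rw [finishB_one _ _ hf, par_one]
        have hmm : PySem.Int.mod (((m + 1 : Nat) : Int) + 1 - 1) 2 = (((m + 1) % 2 : Nat) : Int) := by
          have hc : ((m + 1 : Nat) : Int) + 1 - 1 = ((m + 1 : Nat) : Int) := by ring
          rw [hc]; exact_mod_cast PySem.Int.mod_natCast (m + 1) 2
        rw [hmm]
        rcases Nat.mod_two_eq_zero_or_one (m + 1) with h | h <;> simp [h]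

-- ===== VERDICT (by name: the statement is the Claim_ definition above) =====
theorem findProfession_spec : Claim_equal_findProfession := by
  intro level pos _ hpre
  unfold Spec_findProfession
  have hm : level = ((level - 1).toNat : Int) + 1 := by
    have := hpre; unfold Pre_findProfession at this; omega
  rw [alt_eq, findProfession, A_char,
    loop_inv (level - 1).toNat level pos 0 hm (Or.inl rfl)]
  rcases Bool.eq_false_or_eq_true (par (level - 1).toNat pos) with hp | hp <;> rw [hp] <;> simp
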